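-- pv_equiv track=rewrite | github.com/dangth2004/python | midterm/midterm_2023.py | find_minimum_sum
-- ===== SOURCE A (Python) =====
-- def find_minimum_sum(nums):
--     """
--     Tìm đỉnh núi có tổng nhỏ nhất.
--     Cho một danh sách số nguyên dương nums
--     Bộ 3 chỉ số i, j, k được gọi là đỉnh núi nếu thỏa mãn:
--     i < j < k và nums[i] < nums[j] và nums[j] > nums[k]
--     Ví dụ 1: input [8,6,1,5,3]
--     với i = 2, j = 3 k = 4 tương ứng tạo thành một đỉnh núi với tổng bằng 9 (1 + 5 + 3)
--     output: 9
--     Ví dụ 2: input [5,4,8,7,10,2]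
--     i = 0, j = 2, k = 5 tạo thành một đỉnh núi với tổng bằng 15.
--     i = 1, j = 4, k = 5 tạo thành một đỉnh núi với tổng bằng 16.
--     output : 13
--     Nếu không tồn tại đỉnh núi nào trong danh sách
--     output : -1
--     """
--     min_sum = float('inf')
--     n = len(nums)
--     found = False
--
--     for j in range(1, n - 1):
--         for i in range(0, j):
--             if nums[i] < nums[j]:
--                 for k in range(j + 1, n):
--                     if nums[k] < nums[j]:
--                         found = True
--                         total = nums[i] + nums[j] + nums[k]
--                         if total < min_sum:
--                             min_sum = total
--
--     return min_sum if found else -1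
-- ===== SOURCE B (Python) =====
-- def find_minimum_sum(nums):
--     n = len(nums)
--     # sufs[j] = min(nums[j+1:]) or None, built back to front in one pass
--     sufs = [None] * n
--     m = None
--     for j in range(n - 1, -1, -1):
--         sufs[j] = m
--         if m is None or nums[j] < m:
--             m = nums[j]
--     best = None
--     left = None  # min(nums[:j]) or None, maintained forward
--     for v, s in zip(nums, sufs):
--         if left is not None and s is not None and left < v and s < v:
--             t = left + v + s
--             if best is None or t < best:
--                 best = t
--         if left is None or v < left:
--             left = v
--     return -1 if best is None else best
-- ===== Notes on version B (the rewrite author's own statement) =====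
-- stated objective: faster
-- what changed: Replaced the triple nested loop over (i,j,k) by a single backward pass computing suffix minima plus one forward pass maintaining the prefix minimum: for each peak j the best triple is prefix-min + nums[j] + suffix-min when both are below nums[j].
import Mathlib
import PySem

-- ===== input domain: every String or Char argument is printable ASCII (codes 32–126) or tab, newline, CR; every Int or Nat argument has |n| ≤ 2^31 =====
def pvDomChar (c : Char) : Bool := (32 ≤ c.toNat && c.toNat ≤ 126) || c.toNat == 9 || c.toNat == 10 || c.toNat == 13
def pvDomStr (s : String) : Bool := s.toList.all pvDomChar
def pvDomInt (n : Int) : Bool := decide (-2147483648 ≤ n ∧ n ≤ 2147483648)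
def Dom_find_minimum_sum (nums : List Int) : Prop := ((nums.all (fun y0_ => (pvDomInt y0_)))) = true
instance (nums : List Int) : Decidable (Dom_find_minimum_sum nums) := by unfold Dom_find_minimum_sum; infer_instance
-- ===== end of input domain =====

-- B replaces A's triple nested loop by one backward suffix-minimum pass plus one forward pass
-- keeping the running prefix minimum (objective: faster, O(n) instead of O(n^3)).

-- Shared tiny helper: the Python idiom 'if m is None or t < m: m = t' (running minimum with
-- None = "no value yet"; in A, min_sum = float('inf') with no candidate seen is the same state).
def pvMinO (m : Option Int) (t : Int) : Option Int :=
  match m with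
  | none => some t
  | some v => if t < v then some t else some v

-- ===== PORT A =====
-- state: (found, min_sum) with min_sum : Option Int, none = float('inf') (no candidate yet).
def find_minimum_sum (nums : List Int) : Int :=
  let n : Int := nums.length
  let st : Bool × Option Int :=
    (PySem.List.pyRange 1 (n - 1) 1).foldl (fun st j =>
      (PySem.List.pyRange 0 j 1).foldl (fun st i =>
        if PySem.List.pyGetD nums i 0 < PySem.List.pyGetD nums j 0 then
          (PySem.List.pyRange (j + 1) n 1).foldl (fun st k =>
            if PySem.List.pyGetD nums k 0 < PySem.List.pyGetD nums j 0 then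
              (true, pvMinO st.2 (PySem.List.pyGetD nums i 0 + PySem.List.pyGetD nums j 0 + PySem.List.pyGetD nums k 0))
            else st) st
        else st) st) ((false, none) : Bool × Option Int)
  if st.1 then st.2.getD (-1) else -1

-- ===== PORT B =====
-- backward pass of Source B: builds sufs (sufs[j] = min of nums[j+1:], none if empty) back to front
-- while updating the running minimum m; returns (sufs, m).
def pvSufs : List Int → List (Option Int) × Option Int
  | [] => ([], none)
  | x :: r =>
    match pvSufs r with
    | (l, m) => (m :: l, pvMinO m x)

def find_minimum_sum_alt (nums : List Int) : Int :=
  let sufs := (pvSufs nums).1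
  let st : Option Int × Option Int :=   -- (best, left)
    (nums.zip sufs).foldl (fun st p =>
      let v := p.1
      let s := p.2
      let best :=
        match st.2, s with
        | some a, some c =>
          if a < v ∧ c < v then pvMinO st.1 (a + v + c) else st.1
        | _, _ => st.1
      (best, pvMinO st.2 v)) ((none, none) : Option Int × Option Int)
  match st.1 with
  | none => -1
  | some m => m

-- ===== PRECONDITION & SPEC =====
def Spec_find_minimum_sum (nums : List Int) (out : Int) : Prop := out = find_minimum_sum_alt nums
instance (nums : List Int) (out : Int) : Decidable (Spec_find_minimum_sum nums out) := by unfold Spec_find_minimum_sum; infer_instance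

-- ===== CLAIM (what is proved, stated in full; the proofs are below) =====
def Claim_equal_find_minimum_sum : Prop := ∀ (nums : List Int), Dom_find_minimum_sum nums → Spec_find_minimum_sum nums (find_minimum_sum nums)

-- ===== LEMMAS AND PROOFS =====

-- plain running minimum of a list (right fold), none on []
def pvPm : List Int → Option Int
  | [] => none
  | x :: r => pvMinO (pvPm r) x

-- minimum of the elements strictly below v, none if there is none
def pvMlt : List Int → Int → Option Int
  | [], _ => none
  | x :: r, v => if x < v then pvMinO (pvMlt r v) x else pvMlt r v

-- one peak step on the (found, best) state: prefix min p, suffix min s, peak value v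
def pvStep (p s : Option Int) (v : Int) (st : Bool × Option Int) : Bool × Option Int :=
  match p, s with
  | some a, some c => if a < v ∧ c < v then (true, pvMinO st.2 (a + v + c)) else st
  | _, _ => st

def pvStepB (p s : Option Int) (v : Int) (best : Option Int) : Option Int :=
  match p, s with
  | some a, some c => if a < v ∧ c < v then pvMinO best (a + v + c) else best
  | _, _ => best

def pvFound (p s : Option Int) (v : Int) : Bool :=
  match p, s with
  | some a, some c => decide (a < v ∧ c < v)
  | _, _ => false

-- structural core: walk the list keeping left = running prefix minimum
def pvCoreG : Bool × Option Int → Option Int → List Int → Bool × Option Int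
  | st, _, [] => st
  | st, left, v :: r => pvCoreG (pvStep left (pvPm r) v st) (pvMinO left v) r

def pvCoreB : Option Int → Option Int → List Int → Option Int
  | best, _, [] => best
  | best, left, v :: r => pvCoreB (pvStepB left (pvPm r) v best) (pvMinO left v) r

def pvHas : Option Int → List Int → Bool
  | _, [] => false
  | left, v :: r => pvFound left (pvPm r) v || pvHas (pvMinO left v) r

def pvMergeO (a t : Option Int) : Option Int :=
  match t with
  | none => a
  | some x => pvMinO a x

lemma pvMinO_none (t : Int) : pvMinO none t = some t := rfl

lemma pvMinO_some (a t : Int) : pvMinO (some a) t = some (min t a) := by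
  simp [pvMinO, min_def]; split_ifs <;> simp <;> omega

lemma pvMinO_minO (s : Option Int) (a b : Int) :
    pvMinO (pvMinO s a) b = pvMinO s (min a b) := by
  cases s <;> simp only [pvMinO_none, pvMinO_some, Option.some.injEq] <;> omega

lemma pvMergeO_swap (a : Option Int) (y : Int) (t : Option Int) :
    pvMergeO (pvMinO a y) t = pvMergeO a (pvMinO t y) := by
  cases a <;> cases t <;>
    simp only [pvMergeO, pvMinO_none, pvMinO_some, Option.some.injEq] <;> omega

lemma foldl_pvMinO (l : List Int) : ∀ (acc : Option Int),
    l.foldl pvMinO acc = pvMergeO acc (pvPm l) := by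
  induction l with
  | nil => intro acc; rfl
  | cons x r ih =>
    intro acc
    rw [List.foldl_cons, ih, pvPm, pvMergeO_swap]

-- the inner 'for k' / outer 'for i' loop shape: run the candidates below v through pvMinO
lemma foldl_minO_if (g : Int → Int) (hg : ∀ x y, x < y ↔ g x < g y) (v : Int) :
    ∀ (l : List Int) (st : Bool × Option Int),
    l.foldl (fun st x => if x < v then (true, pvMinO st.2 (g x)) else st) st
      = match pvMlt l v with
        | none => st
        | some c => (true, pvMinO st.2 (g c)) := by
  intro l
  induction l with
  | nil => intro st; rfl
  | cons x r ih =>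
    intro st
    rw [List.foldl_cons]
    by_cases hx : x < v
    · rw [if_pos hx, ih]
      simp only [pvMlt, if_pos hx]
      cases hc : pvMlt r v with
      | none => simp [pvMinO]
      | some c =>
        have h1 := pvMinO_some c x
        have h2 : g (min x c) = min (g x) (g c) := by
          rcases lt_trichotomy x c with h | h | h
          · rw [min_eq_left h.le, min_eq_left ((hg x c).1 h).le]
          · subst h; simp
          · rw [min_eq_right h.le, min_eq_right ((hg c x).1 h).le]
        simp only [h1]
        rw [pvMinO_minO, ← h2]
    · rw [if_neg hx, ih]
      simp only [pvMlt, if_neg hx]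

lemma pvMlt_pm (v : Int) (l : List Int) :
    pvMlt l v = match pvPm l with
                | none => none
                | some p => if p < v then some p else none := by
  induction l with
  | nil => rfl
  | cons x r ih =>
    cases hp : pvPm r with
    | none => simp [pvMlt, pvPm, hp, ih, pvMinO_none]
    | some p =>
      simp only [pvMlt, pvPm, hp, ih, pvMinO_some]
      split_ifs <;> simp_all [pvMinO_some, pvMinO_none]
      all_goals omega

lemma pvSufs_snd (l : List Int) : (pvSufs l).2 = pvPm l := by
  induction l with
  | nil => rfl
  | cons x r ih => simp [pvSufs, pvPm, ← ih]

lemma pvCoreG_split (l : List Int) : ∀ (b : Bool) (o left : Option Int),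
    pvCoreG (b, o) left l = (b || pvHas left l, pvCoreB o left l) := by
  induction l with
  | nil => intro b o left; simp [pvCoreG, pvHas, pvCoreB]
  | cons v r ih =>
    intro b o left
    simp only [pvCoreG, pvHas, pvCoreB]
    have hstep : pvStep left (pvPm r) v (b, o)
        = (b || pvFound left (pvPm r) v, pvStepB left (pvPm r) v o) := by
      unfold pvStep pvStepB pvFound
      cases left <;> cases pvPm r <;> simp <;> split_ifs <;> simp_all
    rw [hstep, ih]
    simp [Bool.or_assoc]

lemma pvStepB_some (p s : Option Int) (v m : Int) :
    ∃ t, pvStepB p s v (some m) = some t := by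
  cases p <;> cases s <;> simp [pvStepB, pvMinO] <;> split_ifs <;> simp

lemma pvStepB_of_found_false (p s : Option Int) (v : Int) (best : Option Int)
    (h : pvFound p s v = false) : pvStepB p s v best = best := by
  cases p <;> cases s <;> simp_all [pvFound, pvStepB]

lemma pvStepB_of_found_true (p s : Option Int) (v : Int) (best : Option Int)
    (h : pvFound p s v = true) : ∃ t, pvStepB p s v best = some t := by
  cases p <;> cases s <;> simp_all [pvFound, pvStepB]
  cases best <;> simp [pvMinO] <;> split_ifs <;> simp

lemma pvCoreB_some (l : List Int) : ∀ (m : Int) (left : Option Int),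
    ∃ m', pvCoreB (some m) left l = some m' := by
  induction l with
  | nil => intro m left; exact ⟨m, rfl⟩
  | cons v r ih =>
    intro m left
    simp only [pvCoreB]
    obtain ⟨t, ht⟩ := pvStepB_some left (pvPm r) v m
    rw [ht]
    exact ih t _

lemma pvCoreB_of_not_has (l : List Int) : ∀ (best left : Option Int),
    pvHas left l = false → pvCoreB best left l = best := by
  induction l with
  | nil => intro best left _; rfl
  | cons v r ih =>
    intro best left h
    simp only [pvHas, Bool.or_eq_false_iff] at h
    simp only [pvCoreB]
    rw [pvStepB_of_found_false _ _ _ _ h.1]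
    exact ih best _ h.2

lemma pvHas_isSome (l : List Int) : ∀ (best left : Option Int),
    pvHas left l = true → ∃ m, pvCoreB best left l = some m := by
  induction l with
  | nil => intro best left h; simp [pvHas] at h
  | cons v r ih =>
    intro best left h
    simp only [pvHas, Bool.or_eq_true] at h
    simp only [pvCoreB]
    rcases h with h | h
    · obtain ⟨t, ht⟩ := pvStepB_of_found_true left (pvPm r) v best h
      rw [ht]
      exact pvCoreB_some r t _
    · exact ih _ _ h

-- index fold over range = structural core
lemma range_fold_core (l : List Int) : ∀ (acc : Option Int) (st : Bool × Option Int),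
    (List.range l.length).foldl
      (fun st k => pvStep ((l.take k).foldl pvMinO acc) (pvPm (l.drop (k + 1))) (l.getD k 0) st) st
      = pvCoreG st acc l := by
  induction l with
  | nil => intro acc st; rfl
  | cons x r ih =>
    intro acc st
    rw [List.length_cons, List.range_succ_eq_map, List.foldl_cons, List.foldl_map]
    have h0 : pvStep ((([] : List Int)).foldl pvMinO acc) (pvPm ((x :: r).drop 1)) ((x :: r).getD 0 0) st
        = pvStep acc (pvPm r) x st := rfl
    have hbody : ∀ (st : Bool × Option Int) (k : Nat),
        pvStep (((x :: r).take (k.succ)).foldl pvMinO acc) (pvPm ((x :: r).drop (k.succ + 1))) ((x :: r).getD k.succ 0) st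
          = pvStep ((r.take k).foldl pvMinO (pvMinO acc x)) (pvPm (r.drop (k + 1))) (r.getD k 0) st := by
      intro st k
      rfl
    calc (List.range r.length).foldl (fun st k => pvStep (((x :: r).take (k.succ)).foldl pvMinO acc) (pvPm ((x :: r).drop (k.succ + 1))) ((x :: r).getD k.succ 0) st) (pvStep acc (pvPm r) x st)
        = (List.range r.length).foldl (fun st k => pvStep ((r.take k).foldl pvMinO (pvMinO acc x)) (pvPm (r.drop (k + 1))) (r.getD k 0) st) (pvStep acc (pvPm r) x st) := by
          exact PySem.List.foldl_congr_mem _ _ _ _ (fun st k _ => hbody st k)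

      _ = pvCoreG (pvStep acc (pvPm r) x st) (pvMinO acc x) r := ih _ _
      _ = pvCoreG st acc (x :: r) := rfl

lemma pvStep_none_left (s : Option Int) (v : Int) (st : Bool × Option Int) :
    pvStep none s v st = st := by cases s <;> rfl

lemma pvStep_none_right (p : Option Int) (v : Int) (st : Bool × Option Int) :
    pvStep p none v st = st := by cases p <;> rfl

lemma pvStep_not_lt_right (p : Option Int) (c v : Int) (h : ¬ c < v) (st : Bool × Option Int) :
    pvStep p (some c) v st = st := by
  cases p with
  | none => rfl
  | some a => simp only [pvStep]; rw [if_neg (by tauto)]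

lemma pvStep_not_lt_left (a v : Int) (h : ¬ a < v) (s : Option Int) (st : Bool × Option Int) :
    pvStep (some a) s v st = st := by
  cases s with
  | none => rfl
  | some c => simp only [pvStep]; rw [if_neg (by tauto)]

lemma pvMergeO_none_left (t : Option Int) : pvMergeO none t = t := by
  cases t <;> rfl

lemma pvMlt_some_elim {L : List Int} {v a : Int} (h : pvMlt L v = some a) :
    pvPm L = some a ∧ a < v := by
  rw [pvMlt_pm] at h
  cases hp : pvPm L with
  | none => rw [hp] at h; simp at h
  | some p =>
    rw [hp] at h
    dsimp only at h
    split_ifs at h with hpv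
    all_goals simp_all

lemma pvStep_of_mlt_none_right (p : Option Int) (R : List Int) (v : Int)
    (h : pvMlt R v = none) (st : Bool × Option Int) : pvStep p (pvPm R) v st = st := by
  rw [pvMlt_pm] at h
  cases hp : pvPm R with
  | none => exact pvStep_none_right p v st
  | some c =>
    rw [hp] at h
    dsimp only at h
    split_ifs at h with hc
    exact pvStep_not_lt_right p c v hc st

lemma pvStep_of_mlt_none_left (L : List Int) (s : Option Int) (v : Int)
    (h : pvMlt L v = none) (st : Bool × Option Int) : pvStep (pvPm L) s v st = st := by
  rw [pvMlt_pm] at h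
  cases hp : pvPm L with
  | none => exact pvStep_none_left s v st
  | some a =>
    rw [hp] at h
    dsimp only at h
    split_ifs at h with ha
    exact pvStep_not_lt_left a v ha s st

lemma pvStep_of_mlt_some {L R : List Int} {v a c : Int} (hL : pvMlt L v = some a)
    (hR : pvMlt R v = some c) (st : Bool × Option Int) :
    pvStep (pvPm L) (pvPm R) v st = (true, pvMinO st.2 (a + v + c)) := by
  obtain ⟨hpL, hav⟩ := pvMlt_some_elim hL
  obtain ⟨hpR, hcv⟩ := pvMlt_some_elim hR
  rw [hpL, hpR]
  simp only [pvStep]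
  rw [if_pos ⟨hav, hcv⟩]

-- the body of A's outer loop at one peak index j, reduced to pvStep
lemma perJ (nums : List Int) (j : Int) (h0 : 0 ≤ j) (h1 : j < (nums.length : Int))
    (st : Bool × Option Int) :
    (PySem.List.pyRange 0 j 1).foldl (fun st i =>
        if PySem.List.pyGetD nums i 0 < PySem.List.pyGetD nums j 0 then
          (PySem.List.pyRange (j + 1) (nums.length : Int) 1).foldl (fun st k =>
            if PySem.List.pyGetD nums k 0 < PySem.List.pyGetD nums j 0 then
              (true, pvMinO st.2 (PySem.List.pyGetD nums i 0 + PySem.List.pyGetD nums j 0 + PySem.List.pyGetD nums k 0))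
            else st) st
        else st) st
      = pvStep (pvPm (nums.take j.toNat)) (pvPm (nums.drop (j.toNat + 1))) (nums.getD j.toNat 0) st := by
  have hvnat : PySem.List.pyGetD nums j 0 = nums.getD j.toNat 0 := by
    have h := PySem.List.pyGetD_natCast nums j.toNat 0
    rw [Int.toNat_of_nonneg h0] at h
    exact h
  rw [hvnat]
  set V := nums.getD j.toNat 0 with hV
  have hinner : ∀ (aa : Int) (st : Bool × Option Int),
      (PySem.List.pyRange (j + 1) (nums.length : Int) 1).foldl (fun st k =>
        if PySem.List.pyGetD nums k 0 < V then
          (true, pvMinO st.2 (aa + V + PySem.List.pyGetD nums k 0))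
        else st) st
      = match pvMlt (nums.drop (j.toNat + 1)) V with
        | none => st
        | some c => (true, pvMinO st.2 (aa + V + c)) := by
    intro aa st
    have hconv := PySem.List.foldl_pyRange_pyGetD' nums 0
      (fun st x => if x < V then (true, pvMinO st.2 (aa + V + x)) else st) st (a := j + 1) (by omega)
    rw [show (j + 1).toNat = j.toNat + 1 from by omega] at hconv
    rw [hconv]
    exact foldl_minO_if (fun x => aa + V + x)
      (by intro x y; show x < y ↔ aa + V + x < aa + V + y; omega) V
      (nums.drop (j.toNat + 1)) st
  simp only [hinner]
  cases hR : pvMlt (nums.drop (j.toNat + 1)) V with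
  | none =>
    simp only [ite_self]
    rw [PySem.List.foldl_ignore]
    exact (pvStep_of_mlt_none_right _ _ _ hR st).symm
  | some c =>
    have hlen : ((nums.take j.toNat).length : Int) = j := by
      rw [List.length_take]
      omega
    have hpre := PySem.List.foldl_pyRange_zero_pyGetD' (nums.take j.toNat) 0
      (fun st x => if x < V then (true, pvMinO st.2 (x + V + c)) else st) st
    rw [hlen] at hpre
    have hcong : (PySem.List.pyRange 0 j 1).foldl (fun st i =>
          if PySem.List.pyGetD nums i 0 < V then
            (true, pvMinO st.2 (PySem.List.pyGetD nums i 0 + V + c))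
          else st) st
        = (PySem.List.pyRange 0 j 1).foldl (fun st i =>
          if PySem.List.pyGetD (nums.take j.toNat) i 0 < V then
            (true, pvMinO st.2 (PySem.List.pyGetD (nums.take j.toNat) i 0 + V + c))
          else st) st := by
      apply PySem.List.foldl_congr_mem
      intro st i hi
      obtain ⟨hi0, hij⟩ := PySem.List.mem_pyRange_one.mp hi
      rw [PySem.List.pyGetD_eq_getElem nums 0 hi0 (by omega),
          PySem.List.pyGetD_eq_getElem (nums.take j.toNat) 0 hi0 (by rw [hlen]; omega),
          List.getElem_take]
    rw [hcong, hpre,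
      foldl_minO_if (fun x => x + V + c)
        (by intro x y; show x < y ↔ x + V + c < y + V + c; omega) V]
    cases hL : pvMlt (nums.take j.toNat) V with
    | none => exact (pvStep_of_mlt_none_left _ _ _ hL st).symm
    | some a => exact (pvStep_of_mlt_some hL hR st).symm

def pvStepJ (nums : List Int) (j : Int) (st : Bool × Option Int) : Bool × Option Int :=
  pvStep (pvPm (nums.take j.toNat)) (pvPm (nums.drop (j.toNat + 1))) (nums.getD j.toNat 0) st

lemma pvStepJ_zero (nums : List Int) (st : Bool × Option Int) : pvStepJ nums 0 st = st := by
  unfold pvStepJ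
  exact pvStep_none_left _ _ _

lemma pvStepJ_last (nums : List Int) (st : Bool × Option Int)
    (h : 1 ≤ (nums.length : Int)) : pvStepJ nums ((nums.length : Int) - 1) st = st := by
  unfold pvStepJ
  have hd : nums.drop (((nums.length : Int) - 1).toNat + 1) = [] := by
    apply List.drop_eq_nil_of_le
    omega
  rw [hd]
  exact pvStep_none_right _ _ _

lemma ext_range (nums : List Int) (st : Bool × Option Int) :
    (PySem.List.pyRange 0 (nums.length : Int) 1).foldl (fun st j => pvStepJ nums j st) st
      = (PySem.List.pyRange 1 ((nums.length : Int) - 1) 1).foldl (fun st j => pvStepJ nums j st) st := by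
  by_cases hn : (nums.length : Int) ≤ 1
  · rw [PySem.List.pyRange_one_eq_nil (by omega : (nums.length : Int) - 1 ≤ 1)]
    rcases Nat.le_one_iff_eq_zero_or_eq_one.mp (by exact_mod_cast hn) with h0 | h1
    · rw [h0]
      rfl
    · rw [h1]
      show List.foldl _ st (PySem.List.pyRange 0 1 1) = st
      rw [show PySem.List.pyRange 0 1 1 = [0] from by decide]
      show pvStepJ nums 0 st = st
      exact pvStepJ_zero nums st
  · have hsing : PySem.List.pyRange ((nums.length : Int) - 1) (nums.length : Int) 1
        = [(nums.length : Int) - 1] := by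
      have h := PySem.List.pyRange_one_singleton ((nums.length : Int) - 1)
      rw [sub_add_cancel] at h
      exact h
    rw [PySem.List.pyRange_one_append 0 1 (nums.length : Int) (by omega) (by omega),
        PySem.List.pyRange_one_append 1 ((nums.length : Int) - 1) (nums.length : Int)
          (by omega) (by omega),
        show PySem.List.pyRange 0 1 1 = [0] from by decide, hsing,
        List.foldl_append, List.foldl_append]
    simp only [List.foldl_cons, List.foldl_nil]
    rw [pvStepJ_zero, pvStepJ_last _ _ (by omega)]

lemma nat_range (nums : List Int) (st : Bool × Option Int) :
    (PySem.List.pyRange 0 (nums.length : Int) 1).foldl (fun st j => pvStepJ nums j st) st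
      = (List.range nums.length).foldl (fun st (k : Nat) => pvStepJ nums (k : Int) st) st := by
  rw [PySem.List.pyRange_one, List.foldl_map]
  simp only [zero_add, sub_zero, Int.toNat_natCast]

lemma core_from_range (nums : List Int) (st : Bool × Option Int) :
    (List.range nums.length).foldl (fun st (k : Nat) => pvStepJ nums (k : Int) st) st
      = pvCoreG st none nums := by
  rw [← range_fold_core nums none st]
  apply PySem.List.foldl_congr_mem
  intro st k _
  simp only [pvStepJ, Int.toNat_natCast, foldl_pvMinO, pvMergeO_none_left]

lemma A_eq_core (nums : List Int) :
    find_minimum_sum nums =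
      (if (pvCoreG (false, none) none nums).1 then ((pvCoreG (false, none) none nums).2).getD (-1) else -1) := by
  simp only [find_minimum_sum]
  have hA : (PySem.List.pyRange 1 ((nums.length : Int) - 1) 1).foldl (fun st j =>
      (PySem.List.pyRange 0 j 1).foldl (fun st i =>
        if PySem.List.pyGetD nums i 0 < PySem.List.pyGetD nums j 0 then
          (PySem.List.pyRange (j + 1) (nums.length : Int) 1).foldl (fun st k =>
            if PySem.List.pyGetD nums k 0 < PySem.List.pyGetD nums j 0 then
              (true, pvMinO st.2 (PySem.List.pyGetD nums i 0 + PySem.List.pyGetD nums j 0 + PySem.List.pyGetD nums k 0))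
            else st) st
        else st) st) ((false, none) : Bool × Option Int)
      = pvCoreG (false, none) none nums := by
    calc _ = (PySem.List.pyRange 1 ((nums.length : Int) - 1) 1).foldl
          (fun st j => pvStepJ nums j st) ((false, none) : Bool × Option Int) := by
          apply PySem.List.foldl_congr_mem
          intro st j hj
          obtain ⟨hj1, hj2⟩ := PySem.List.mem_pyRange_one.mp hj
          exact perJ nums j (by omega) (by omega) st
      _ = (PySem.List.pyRange 0 (nums.length : Int) 1).foldl
          (fun st j => pvStepJ nums j st) ((false, none) : Bool × Option Int) :=
          (ext_range nums _).symm
      _ = (List.range nums.length).foldl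
          (fun st (k : Nat) => pvStepJ nums (k : Int) st) ((false, none) : Bool × Option Int) :=
          nat_range nums _
      _ = pvCoreG (false, none) none nums := core_from_range nums _
  rw [hA]

lemma B_fold (l : List Int) : ∀ (best left : Option Int),
    ((l.zip (pvSufs l).1).foldl (fun st p =>
      (match st.2, p.2 with
       | some a, some c => if a < p.1 ∧ c < p.1 then pvMinO st.1 (a + p.1 + c) else st.1
       | _, _ => st.1,
       pvMinO st.2 p.1)) (best, left)).1 = pvCoreB best left l := by
  induction l with
  | nil => intro best left; rfl
  | cons x r ih =>
    intro best left
    have hs : pvSufs (x :: r) = ((pvSufs r).2 :: (pvSufs r).1, pvMinO (pvSufs r).2 x) := by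
      cases h : pvSufs r
      simp [pvSufs, h]
    rw [hs]
    show ((r.zip (pvSufs r).1).foldl _
        ((match left, (pvSufs r).2 with
          | some a, some c => if a < x ∧ c < x then pvMinO best (a + x + c) else best
          | _, _ => best),
         pvMinO left x)).1 = _
    rw [show (match left, (pvSufs r).2 with
          | some a, some c => if a < x ∧ c < x then pvMinO best (a + x + c) else best
          | _, _ => best) = pvStepB left (pvPm r) x best from by
        rw [pvSufs_snd]
        rfl]
    rw [ih]
    rfl

lemma B_eq_core (nums : List Int) :
    find_minimum_sum_alt nums =
      (match pvCoreB none none nums with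
       | none => -1
       | some m => m) := by
  simp only [find_minimum_sum_alt]
  rw [B_fold nums none none]

-- ===== VERDICT (by name: the statement is the Claim_ definition above) =====
theorem find_minimum_sum_spec : Claim_equal_find_minimum_sum := by
  intro nums _
  unfold Spec_find_minimum_sum
  rw [A_eq_core, B_eq_core, pvCoreG_split]
  cases h : pvHas none nums with
  | false => simp [pvCoreB_of_not_has nums none none h]
  | true =>
    obtain ⟨m, hm⟩ := pvHas_isSome nums none none h
    simp [hm]
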